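-- pv_equiv track=rewrite | github.com/bhavya2403/Learning-Python | Learning/Algorithms/GreedyAlgorithms/largest_arr.py | smallestArr
-- ===== SOURCE A (Python) =====
-- def swap(arr, i, j):
--     for k in range(j, i, -1):
--         arr[k], arr[k-1] = arr[k-1], arr[k]
--     return arr
--
-- def smallestArr(arr, k):
--     n = len(arr)
--     for i in range(n-1):
--         maxMore = arr[i]
--         max_idx = 0
--         for j in range(i+1, min(n, i+k+1)):
--             if arr[j] > maxMore:
--                 maxMore = arr[j]
--                 max_idx = j
--         if max_idx:
--             arr = swap(arr, i, max_idx)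
--             k -= (max_idx-i)
--
--         if not k:
--             break
--
--     return arr
-- ===== SOURCE B (Python) =====
-- def smallestArr(arr, k):
--     # Sort all indices once by (value descending, index ascending); each round pick the
--     # first candidate in that order whose current position in the remainder fits the budget.
--     order = sorted(range(len(arr)), key=lambda i: (-arr[i], i))
--     rem = list(enumerate(arr))
--     out = []
--     while k > 0 and len(rem) > 1:
--         keys = [j for j, _ in rem]
--         for idx in order:
--             if idx in keys:
--                 p = keys.index(idx)
--                 if p <= k:
--                     out.append(rem[p][1])
--                     del rem[p]
--                     k -= p
--                     break
--     return out + [v for _, v in rem]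
-- ===== Notes on version B (the rewrite author's own statement) =====
-- stated objective: alternative
-- what changed: A repeatedly scans the live window arr[i+1..i+k] for its max and rotates it forward with adjacent swaps; B instead sorts all indices once by (value descending, index ascending) and each round selects the first candidate in that precomputed order whose current position in the remainder is within budget, deleting it and appending it to the output.
import Mathlib
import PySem

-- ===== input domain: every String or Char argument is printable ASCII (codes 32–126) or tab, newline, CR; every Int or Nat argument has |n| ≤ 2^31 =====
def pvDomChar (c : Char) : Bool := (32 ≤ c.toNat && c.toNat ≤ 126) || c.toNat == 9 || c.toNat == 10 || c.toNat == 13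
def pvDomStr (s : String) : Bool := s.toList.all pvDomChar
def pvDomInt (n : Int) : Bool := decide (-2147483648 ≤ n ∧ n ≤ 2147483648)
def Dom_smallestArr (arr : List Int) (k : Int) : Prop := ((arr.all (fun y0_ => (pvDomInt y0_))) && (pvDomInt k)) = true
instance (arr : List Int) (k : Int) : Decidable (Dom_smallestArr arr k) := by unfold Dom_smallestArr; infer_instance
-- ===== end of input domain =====

-- B replaces A's repeated window-scan + adjacent-swap-rotation greedy by a sort-then-select
-- algorithm: sort all indices once by (value descending, index ascending), then each round take
-- the first candidate in that order whose current position in the remainder is within budget;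
-- objective: alternative.  A mutates its argument in place, B does not: the equivalence proved
-- here is about the RETURN value only.

-- ===== PORT A =====
-- arr[k], arr[k-1] = arr[k-1], arr[k] ; indices are always in range in A's use, so pyGetD/pySetD are exact here
def swapStep (a : List Int) (kk : Int) : List Int :=
  let x := PySem.List.pyGetD a (kk - 1) 0
  let y := PySem.List.pyGetD a kk 0
  PySem.List.pySetD (PySem.List.pySetD a kk x) (kk - 1) y

-- def swap(arr, i, j)
def pySwap (arr : List Int) (i j : Int) : List Int :=
  (PySem.List.pyRange j i (-1)).foldl swapStep arr

-- inner scan body: if arr[j] > maxMore: maxMore, max_idx = arr[j], j  (arr[j] always in range here)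
def scanStep (arr : List Int) (st : Int × Int) (j : Int) : Int × Int :=
  if PySem.List.pyGetD arr j 0 > st.1 then (PySem.List.pyGetD arr j 0, j) else st

-- the outer 'for i in range(n-1)' with its break, as recursion over the index list
def aLoop (arr : List Int) (k : Int) (idxs : List Int) (n : Int) : List Int :=
  match idxs with
  | [] => arr
  | i :: rest =>
    let st := (PySem.List.pyRange (i + 1) (min n (i + k + 1)) 1).foldl (scanStep arr)
                (PySem.List.pyGetD arr i 0, 0)
    let arr' := if st.2 ≠ 0 then pySwap arr i st.2 else arr
    let k' := if st.2 ≠ 0 then k - (st.2 - i) else k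
    if k' = 0 then arr' else aLoop arr' k' rest n

def smallestArr (arr : List Int) (k : Int) : List Int :=
  aLoop arr k (PySem.List.pyRange 0 ((arr.length : Int) - 1) 1) (arr.length : Int)

-- ===== PORT B =====
-- order = sorted(range(len(arr)), key=lambda i: (-arr[i], i)); arr[i] with i from range is in range, pyGetD is exact
def bOrder (arr : List Int) : List Int :=
  PySem.List.sorted2 (PySem.List.pyRange 0 (arr.length : Int) 1)
    (fun i => -(PySem.List.pyGetD arr i 0)) (fun i => i) false

-- the inner 'for idx in order: if idx in keys: p = keys.index(idx); if p <= k: … break' test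
def bPick (keys : List Int) (k : Int) (idx : Int) : Bool :=
  match PySem.List.index? keys idx with
  | some p => decide ((p : Int) ≤ k)
  | none => false

-- the while loop of Source B, recursion on the shrinking rem
def bwLoop (order : List Int) (out : List Int) (rem : List (Int × Int)) (k : Int) : List Int :=
  if 0 < k ∧ 1 < rem.length then
    let keys := rem.map Prod.fst
    match hf : order.find? (bPick keys k) with
    | none => out ++ rem.map Prod.snd    -- unreachable: the front of rem always qualifies (Python would spin)
    | some idx =>
      match hp : PySem.List.index? keys idx with
      | none => out ++ rem.map Prod.snd  -- unreachable: bPick guarantees membership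
      | some p =>
        bwLoop order (out ++ [(PySem.List.pyGetD rem (p : Int) (0, 0)).2])
          (rem.take p ++ rem.drop (p + 1)) (k - (p : Int))
  else out ++ rem.map Prod.snd
termination_by rem.length
decreasing_by
  obtain ⟨pre, suf, hw, hl, -⟩ := (PySem.List.index?_eq_some_iff _ idx p).mp hp
  have hpl : p < rem.length := by
    have h2 : keys.length = rem.length := by simp [keys]
    rw [← h2, hw, ← hl]; simp
  simp only [List.length_append, List.length_take, List.length_drop]
  omega

def smallestArr_alt (arr : List Int) (k : Int) : List Int :=
  bwLoop (bOrder arr) [] (PySem.List.enumerate arr 0) k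

-- ===== PRECONDITION & SPEC =====
def Spec_smallestArr (arr : List Int) (k : Int) (out : List Int) : Prop := out = smallestArr_alt arr k
instance (arr : List Int) (k : Int) (out : List Int) : Decidable (Spec_smallestArr arr k out) := by unfold Spec_smallestArr; infer_instance

-- ===== CLAIM (what is proved, stated in full; the proofs are below) =====
def Claim_equal_smallestArr : Prop := ∀ (arr : List Int) (k : Int), Dom_smallestArr arr k → Spec_smallestArr arr k (smallestArr arr k)

-- ===== LEMMAS AND PROOFS =====

-- proof-only intermediate greedy: take the max of the first k+1 of the remainder, emit, delete
def bLoop (out xs : List Int) (k : Int) : List Int :=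
  if 0 < k ∧ 1 < xs.length then
    let w := xs.take (k + 1).toNat
    match hb : PySem.List.max? w (fun y => y) with
    | none => out ++ xs
    | some best =>
      match hm : PySem.List.index? w best with
      | none => out ++ xs
      | some m => bLoop (out ++ [best]) (xs.take m ++ xs.drop (m + 1)) (k - (m : Int))
  else out ++ xs
termination_by xs.length
decreasing_by
  have h := (PySem.List.index?_eq_some_iff w best m).mp hm
  obtain ⟨pre, suf, hw, hl, -⟩ := h
  have hmw : m < w.length := by rw [hw, ← hl]; simp
  have hwx : w.length ≤ xs.length := by simp [w]
  simp only [List.length_append, List.length_take, List.length_drop]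
  omega

-- proof-only model of A's inner scan: elements still to look at, current max, current max_idx, absolute position of the next element
def findBest : List Int → Int → Int → Int → Int × Int
  | [], cur, bi, _ => (cur, bi)
  | y :: t, cur, bi, p => if y > cur then findBest t y p (p + 1) else findBest t cur bi (p + 1)

theorem findBest_fst (t : List Int) : ∀ (cur bi p : Int), (findBest t cur bi p).1 = t.foldl max cur := by
  induction t with
  | nil => intro cur bi p; rfl
  | cons y t ih =>
    intro cur bi p
    by_cases h : y > cur
    · simp only [findBest, if_pos h, ih, List.foldl_cons]
      rw [max_eq_right (le_of_lt h)]
    · simp only [findBest, if_neg h, ih, List.foldl_cons]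
      rw [max_eq_left (not_lt.mp h)]

theorem findBest_snd (t : List Int) : ∀ (cur bi p : Int),
    (findBest t cur bi p).2 =
      if cur < t.foldl max cur then p + ((PySem.List.index? t (t.foldl max cur)).getD 0 : Int)
      else bi := by
  induction t with
  | nil => intro cur bi p; simp [findBest]
  | cons y t ih =>
    intro cur bi p
    by_cases h : y > cur
    · simp only [findBest, if_pos h, List.foldl_cons, max_eq_right (le_of_lt h)]
      rw [ih]
      have hy := (PySem.List.le_foldl_max t y).1
      by_cases h2 : y < t.foldl max y
      · rw [if_pos h2, if_pos (lt_trans h h2)]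
        have hmem : t.foldl max y ∈ t := by
          rcases PySem.List.foldl_max_mem t y with h3 | h3
          · omega
          · exact h3
        obtain ⟨j, hj⟩ := Option.isSome_iff_exists.mp ((PySem.List.index?_isSome_iff t _).mpr hmem)
        rw [PySem.List.index?_cons_of_ne t (by omega), hj]
        simp; ring
      · have hey : t.foldl max y = y := le_antisymm (not_lt.mp h2) hy
        rw [if_neg h2, hey, if_pos h, PySem.List.index?_cons_self]
        simp
    · simp only [findBest, if_neg h, List.foldl_cons, max_eq_left (not_lt.mp h)]
      rw [ih]
      by_cases h2 : cur < t.foldl max cur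
      · rw [if_pos h2, if_pos h2]
        have hmem : t.foldl max cur ∈ t := by
          rcases PySem.List.foldl_max_mem t cur with h3 | h3
          · omega
          · exact h3
        obtain ⟨j, hj⟩ := Option.isSome_iff_exists.mp ((PySem.List.index?_isSome_iff t _).mpr hmem)
        rw [PySem.List.index?_cons_of_ne t (by omega), hj]
        simp; ring
      · rw [if_neg h2, if_neg h2]

theorem pyGetD_append_len (pre : List Int) (y : Int) (ys : List Int) (d : Int) :
    PySem.List.pyGetD (pre ++ y :: ys) (↑pre.length) d = y := by
  simp [PySem.List.pyGetD_natCast]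

theorem pySetD_append_len (pre : List Int) (y v : Int) (ys : List Int) :
    PySem.List.pySetD (pre ++ y :: ys) (↑pre.length) v = pre ++ v :: ys := by
  simp [PySem.List.pySetD_natCast]

theorem scan_eq_findBest (t : List Int) : ∀ (pre suf arr : List Int) (cur bi : Int),
    arr = pre ++ t ++ suf →
    (PySem.List.pyRange (↑pre.length) (↑pre.length + ↑t.length) 1).foldl (scanStep arr) (cur, bi)
      = findBest t cur bi (↑pre.length) := by
  induction t with
  | nil => intro pre suf arr cur bi _; simp [findBest, PySem.List.pyRange_one_eq_nil]
  | cons y t ih =>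
    intro pre suf arr cur bi harr
    have hlt : (↑pre.length : Int) < ↑pre.length + ↑(y :: t).length := by simp
    rw [PySem.List.pyRange_one_cons hlt]
    have hget : PySem.List.pyGetD arr (↑pre.length) 0 = y := by
      rw [harr]; simpa using pyGetD_append_len pre y (t ++ suf) 0
    have harr' : arr = (pre ++ [y]) ++ t ++ suf := by simp [harr]
    have hlen : ((pre ++ [y]).length : Int) = ↑pre.length + 1 := by simp
    have hih := ih (pre ++ [y]) suf arr (if y > cur then y else cur) (if y > cur then ↑pre.length else bi) harr'
    rw [hlen] at hih
    simp only [List.foldl_cons, List.length_cons]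
    by_cases h : y > cur
    · show ((PySem.List.pyRange (↑pre.length + 1) (↑pre.length + (↑t.length + 1)) 1).foldl (scanStep arr)
          (scanStep arr (cur, bi) ↑pre.length)) = _
      have hstep : scanStep arr (cur, bi) ↑pre.length = (y, ↑pre.length) := by
        simp [scanStep, hget, h]
      rw [hstep]
      have : (↑pre.length : Int) + (↑t.length + 1) = (↑pre.length + 1) + ↑t.length := by ring
      rw [this]
      simp only [h, if_pos] at hih
      rw [hih]
      simp [findBest, h]
    · show ((PySem.List.pyRange (↑pre.length + 1) (↑pre.length + (↑t.length + 1)) 1).foldl (scanStep arr)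
          (scanStep arr (cur, bi) ↑pre.length)) = _
      have hstep : scanStep arr (cur, bi) ↑pre.length = (cur, bi) := by
        simp [scanStep, hget, h]
      rw [hstep]
      have : (↑pre.length : Int) + (↑t.length + 1) = (↑pre.length + 1) + ↑t.length := by ring
      rw [this]
      simp only [h, if_neg, if_false] at hih
      rw [hih]
      simp [findBest, h]

theorem swapStep_pair (pre : List Int) (u v : Int) (suf : List Int) :
    swapStep (pre ++ u :: v :: suf) (↑pre.length + 1) = pre ++ v :: u :: suf := by
  have h1 : pre ++ u :: v :: suf = (pre ++ [u]) ++ v :: suf := by simp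
  have hlen : ((pre ++ [u]).length : Int) = ↑pre.length + 1 := by simp
  have hdef : ∀ (a : List Int) (kk : Int), swapStep a kk =
      PySem.List.pySetD (PySem.List.pySetD a kk (PySem.List.pyGetD a (kk - 1) 0)) (kk - 1)
        (PySem.List.pyGetD a kk 0) := fun a kk => rfl
  rw [hdef]
  have hx : PySem.List.pyGetD (pre ++ u :: v :: suf) (↑pre.length + 1 - 1) 0 = u := by
    simpa using pyGetD_append_len pre u (v :: suf) 0
  have hy : PySem.List.pyGetD (pre ++ u :: v :: suf) (↑pre.length + 1) 0 = v := by
    rw [h1, ← hlen]; exact pyGetD_append_len (pre ++ [u]) v suf 0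
  rw [hx, hy]
  have hset1 : PySem.List.pySetD (pre ++ u :: v :: suf) (↑pre.length + 1) u = pre ++ u :: u :: suf := by
    rw [h1, ← hlen, pySetD_append_len]; simp
  rw [hset1]
  have : (↑pre.length : Int) + 1 - 1 = ↑pre.length := by ring
  rw [this]
  exact pySetD_append_len pre u v (u :: suf)

theorem swapFold_rot (mid : List Int) : ∀ (pre suf : List Int) (x b : Int),
    (PySem.List.pyRange (↑pre.length + 1 + ↑mid.length) (↑pre.length) (-1)).foldl swapStep
        (pre ++ x :: mid ++ b :: suf)
      = pre ++ b :: x :: mid ++ suf := by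
  induction mid using List.reverseRecOn with
  | nil =>
    intro pre suf x b
    have h1 : (↑pre.length : Int) < ↑pre.length + 1 + ↑([] : List Int).length := by simp
    rw [PySem.List.pyRange_neg_one_cons h1]
    simp only [List.length_nil, Nat.cast_zero, add_zero, List.foldl_cons]
    have : (↑pre.length : Int) + 1 - 1 = ↑pre.length := by ring
    rw [this, PySem.List.pyRange_neg_one_eq_nil (le_refl _)]
    simp only [List.foldl_nil]
    simpa using swapStep_pair pre x b suf
  | append_singleton mid z ih =>
    intro pre suf x b
    have hj : (↑pre.length : Int) < ↑pre.length + 1 + ↑(mid ++ [z]).length := by simp; omega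
    rw [PySem.List.pyRange_neg_one_cons hj]
    simp only [List.foldl_cons]
    have hsplit : pre ++ x :: (mid ++ [z]) ++ b :: suf = (pre ++ x :: mid) ++ z :: b :: suf := by simp
    have hstep : swapStep (pre ++ x :: (mid ++ [z]) ++ b :: suf) (↑pre.length + 1 + ↑(mid ++ [z]).length)
        = pre ++ x :: mid ++ b :: z :: suf := by
      have hidx : (↑pre.length : Int) + 1 + ↑(mid ++ [z]).length = ↑(pre ++ x :: mid).length + 1 := by
        simp; ring
      rw [hidx, hsplit, swapStep_pair]
    rw [hstep]
    have hidx2 : (↑pre.length : Int) + 1 + ↑(mid ++ [z]).length - 1 = ↑pre.length + 1 + ↑mid.length := by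
      simp; ring
    rw [hidx2]
    have := ih pre (z :: suf) x b
    rw [this]
    simp

theorem aLoop_neg (idxs : List Int) : ∀ (arr : List Int) (k n : Int), k < 0 → aLoop arr k idxs n = arr := by
  induction idxs with
  | nil => intro arr k n _; rfl
  | cons i rest ih =>
    intro arr k n hk
    have hnil : PySem.List.pyRange (i + 1) (min n (i + k + 1)) 1 = [] :=
      PySem.List.pyRange_one_eq_nil (by have := min_le_right n (i + k + 1); omega)
    simp only [aLoop, hnil, List.foldl_nil]
    simp only [ne_eq, not_true_eq_false, ite_false, if_neg (by omega : ¬ (k = 0))]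
    · exact ih arr k n hk

theorem aLoop_cons_zero (arr : List Int) (k i n : Int) (idxs : List Int) (M : Int)
    (hst : (PySem.List.pyRange (i + 1) (min n (i + k + 1)) 1).foldl (scanStep arr)
        (PySem.List.pyGetD arr i 0, 0) = (M, 0)) :
    aLoop arr k (i :: idxs) n = if k = 0 then arr else aLoop arr k idxs n := by
  simp only [aLoop, hst, ne_eq, not_true_eq_false, ite_false]

theorem aLoop_cons_pos (arr : List Int) (k i n : Int) (idxs : List Int) (M V : Int)
    (hV : V ≠ 0)
    (hst : (PySem.List.pyRange (i + 1) (min n (i + k + 1)) 1).foldl (scanStep arr)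
        (PySem.List.pyGetD arr i 0, 0) = (M, V)) :
    aLoop arr k (i :: idxs) n =
      if k - (V - i) = 0 then pySwap arr i V
      else aLoop (pySwap arr i V) (k - (V - i)) idxs n := by
  simp only [aLoop, hst]
  simp [hV]

theorem bLoop_step (out xs : List Int) (k : Int) (hk : 0 < k ∧ 1 < xs.length) (best : Int) (m : Nat)
    (hb : PySem.List.max? (xs.take (k + 1).toNat) (fun y => y) = some best)
    (hm : PySem.List.index? (xs.take (k + 1).toNat) best = some m) :
    bLoop out xs k = bLoop (out ++ [best]) (xs.take m ++ xs.drop (m + 1)) (k - (m : Int)) := by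
  rw [bLoop, if_pos hk]
  simp only []
  split
  · rename_i h; rw [hb] at h; cases h
  · rename_i best' h
    rw [hb] at h
    cases h
    split
    · rename_i h2; rw [hm] at h2; cases h2
    · rename_i m' h2
      rw [hm] at h2
      cases h2
      rfl

theorem bLoop_stop (out xs : List Int) (k : Int) (hk : ¬ (0 < k ∧ 1 < xs.length)) :
    bLoop out xs k = out ++ xs := by
  rw [bLoop, if_neg hk]

theorem main_lemma : ∀ (N : Nat) (xs : List Int), xs.length = N → ∀ (out : List Int) (k : Int),
    aLoop (out ++ xs) k
        (PySem.List.pyRange (↑out.length) (↑out.length + ↑xs.length - 1) 1)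
        (↑out.length + ↑xs.length)
      = bLoop out xs k := by
  intro N
  induction N using Nat.strong_induction_on with
  | _ N ih =>
  intro xs hN out k
  by_cases hlen : xs.length ≤ 1
  · have hr : PySem.List.pyRange (↑out.length) (↑out.length + ↑xs.length - 1) 1 = [] :=
      PySem.List.pyRange_one_eq_nil (by push_cast; omega)
    rw [hr]
    show out ++ xs = bLoop out xs k
    rw [bLoop_stop _ _ _ (by rintro ⟨-, h2⟩; omega)]
  · push_neg at hlen
    obtain ⟨x, rest, rfl⟩ : ∃ x rest, xs = x :: rest := by
      cases xs with
      | nil => simp at hlen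
      | cons a l => exact ⟨a, l, rfl⟩
    have hrl : 0 < rest.length := by simpa using hlen
    have hNr : N = rest.length + 1 := by simpa using hN.symm
    rw [PySem.List.pyRange_one_cons (by push_cast [List.length_cons]; omega)]
    rcases lt_trichotomy k 0 with hk | hk | hk
    · -- k < 0: the inner scan range is empty, nothing ever happens
      have hnil : PySem.List.pyRange (↑out.length + 1)
          (min (↑out.length + ((x :: rest).length : Int)) (↑out.length + k + 1)) 1 = [] :=
        PySem.List.pyRange_one_eq_nil (le_trans (min_le_right _ _) (by omega))
      have hst : (PySem.List.pyRange (↑out.length + 1)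
            (min (↑out.length + ((x :: rest).length : Int)) (↑out.length + k + 1)) 1).foldl
            (scanStep (out ++ x :: rest)) (PySem.List.pyGetD (out ++ x :: rest) (↑out.length) 0, 0)
          = (PySem.List.pyGetD (out ++ x :: rest) (↑out.length) 0, 0) := by
        rw [hnil]; rfl
      rw [aLoop_cons_zero _ _ _ _ _ _ hst, if_neg (by omega), aLoop_neg _ _ _ _ hk,
        bLoop_stop _ _ _ (by rintro ⟨h1, -⟩; omega)]
    · -- k = 0: empty scan, then the break fires immediately
      have hnil : PySem.List.pyRange (↑out.length + 1)
          (min (↑out.length + ((x :: rest).length : Int)) (↑out.length + k + 1)) 1 = [] :=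
        PySem.List.pyRange_one_eq_nil (le_trans (min_le_right _ _) (by omega))
      have hst : (PySem.List.pyRange (↑out.length + 1)
            (min (↑out.length + ((x :: rest).length : Int)) (↑out.length + k + 1)) 1).foldl
            (scanStep (out ++ x :: rest)) (PySem.List.pyGetD (out ++ x :: rest) (↑out.length) 0, 0)
          = (PySem.List.pyGetD (out ++ x :: rest) (↑out.length) 0, 0) := by
        rw [hnil]; rfl
      rw [aLoop_cons_zero _ _ _ _ _ _ hst, if_pos hk,
        bLoop_stop _ _ _ (by rintro ⟨h1, -⟩; omega)]
    · -- k > 0: one real greedy step on both sides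
      have hk1 : (k + 1).toNat = k.toNat + 1 := by omega
      set t := rest.take k.toNat with ht
      set suf := rest.drop k.toNat with hsuf
      have hrest : rest = t ++ suf := (List.take_append_drop _ _).symm
      have hmin : min (↑out.length + ((x :: rest).length : Int)) (↑out.length + k + 1)
          = ↑out.length + 1 + ↑t.length := by
        have htl : t.length = min k.toNat rest.length := by simp [ht]
        push_cast [htl, List.length_cons]
        omega
      have hgx : PySem.List.pyGetD (out ++ x :: rest) (↑out.length) 0 = x :=
        pyGetD_append_len out x rest 0
      set M := t.foldl max x with hM
      have hxM : x ≤ M := (PySem.List.le_foldl_max t x).1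
      have hscan : (PySem.List.pyRange (↑out.length + 1) (↑out.length + 1 + ↑t.length) 1).foldl
            (scanStep (out ++ x :: rest)) (x, 0) = findBest t x 0 (↑out.length + 1) := by
        have h := scan_eq_findBest t (out ++ [x]) suf (out ++ x :: rest) x 0 (by simp [hrest])
        simpa using h
      have hw : (x :: rest).take (k + 1).toNat = x :: t := by rw [hk1]; simp [ht]
      have hb : PySem.List.max? ((x :: rest).take (k + 1).toNat) (fun y => y) = some M := by
        rw [hw, PySem.List.max?_id_cons]
      by_cases hxlt : x < M
      · -- a strictly larger element exists in the window: A swaps it to the front, B emits it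
        have hMne : M ≠ x := by omega
        have hMt : M ∈ t := by
          rcases PySem.List.foldl_max_mem t x with h | h
          · exact absurd h hMne
          · exact h
        obtain ⟨j, hjt⟩ := Option.isSome_iff_exists.mp
          ((PySem.List.index?_isSome_iff t M).mpr hMt)
        obtain ⟨mid, suf0, ht2, hmidlen, hMpre⟩ := (PySem.List.index?_eq_some_iff t M j).mp hjt
        have hidxw : PySem.List.index? ((x :: rest).take (k + 1).toNat) M = some (j + 1) := by
          rw [hw, PySem.List.index?_cons_of_ne t (Ne.symm hMne), hjt]; rfl
        have hstv : findBest t x 0 (↑out.length + 1)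
            = (M, (out.length : Int) + 1 + (j : Int)) := by
          refine Prod.ext_iff.mpr ⟨findBest_fst t x 0 _, ?_⟩
          rw [findBest_snd t x 0 _, if_pos hxlt, hjt]
          simp
        have hst : (PySem.List.pyRange (↑out.length + 1)
              (min (↑out.length + ((x :: rest).length : Int)) (↑out.length + k + 1)) 1).foldl
              (scanStep (out ++ x :: rest)) (PySem.List.pyGetD (out ++ x :: rest) (↑out.length) 0, 0)
            = (M, (out.length : Int) + 1 + (j : Int)) := by
          rw [hgx, hmin, hscan, hstv]
        have harr : out ++ x :: rest = out ++ x :: mid ++ M :: (suf0 ++ suf) := by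
          simp [hrest, ht2]
        have hswap : pySwap (out ++ x :: rest) (↑out.length) ((out.length : Int) + 1 + (j : Int))
            = out ++ M :: x :: mid ++ (suf0 ++ suf) := by
          unfold pySwap
          rw [harr, ← hmidlen]
          have h := swapFold_rot mid out (suf0 ++ suf) x M
          simpa using h
        have hksub : ((out.length : Int) + 1 + (j : Int)) - ↑out.length = (j : Int) + 1 := by ring
        rw [aLoop_cons_pos _ _ _ _ _ _ _ (by omega) hst, hksub, hswap]
        rw [bLoop_step out (x :: rest) k ⟨hk, hlen⟩ M (j + 1) hb hidxw]
        have htake : (x :: rest).take (j + 1) = x :: mid := by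
          rw [hrest, ht2, ← hmidlen]
          simp [List.take_left']
        have hdrop : (x :: rest).drop (j + 1 + 1) = suf0 ++ suf := by
          rw [hrest, ht2, ← hmidlen]
          simp [List.drop_append]
        have hcast : k - ((((j + 1) : Nat)) : Int) = k - ((j : Int) + 1) := by push_cast; ring
        rw [htake, hdrop, hcast]
        simp only [List.cons_append]
        by_cases hk0 : k - ((j : Int) + 1) = 0
        · rw [if_pos hk0, hk0, bLoop_stop _ _ _ (by rintro ⟨h1, -⟩; omega)]
          simp
        · rw [if_neg hk0]
          have hr2 : rest.length = mid.length + 1 + (suf0.length + suf.length) := by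
            rw [hrest, ht2]; simp; omega
          have hlen' : (x :: (mid ++ (suf0 ++ suf))).length = rest.length := by
            simp [hr2]; omega
          have ihh := ih rest.length (by omega) (x :: (mid ++ (suf0 ++ suf))) hlen'
            (out ++ [M]) (k - ((j : Int) + 1))
          have e1 : (out ++ [M]) ++ (x :: (mid ++ (suf0 ++ suf)))
              = out ++ M :: x :: (mid ++ (suf0 ++ suf)) := by simp
          have e2 : (((out ++ [M]).length : Nat) : Int) = ↑out.length + 1 := by simp
          have e3 : (((out ++ [M]).length : Nat) : Int) + ↑(x :: (mid ++ (suf0 ++ suf))).length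
              = ↑out.length + ↑(x :: rest).length := by
            simp only [List.length_cons, List.length_append, List.length_nil]
            push_cast
            omega
          rw [e1, e3, e2] at ihh
          simpa using ihh
      · -- the window max is x itself: A does nothing at this position, B emits x
        have hMeq : M = x := le_antisymm (by omega) hxM
        have hstv : findBest t x 0 (↑out.length + 1) = (M, 0) := by
          refine Prod.ext_iff.mpr ⟨findBest_fst t x 0 _, ?_⟩
          rw [findBest_snd t x 0 _, if_neg (by omega)]
        have hst : (PySem.List.pyRange (↑out.length + 1)
              (min (↑out.length + ((x :: rest).length : Int)) (↑out.length + k + 1)) 1).foldl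
              (scanStep (out ++ x :: rest)) (PySem.List.pyGetD (out ++ x :: rest) (↑out.length) 0, 0)
            = (M, 0) := by
          rw [hgx, hmin, hscan, hstv]
        have hidxw : PySem.List.index? ((x :: rest).take (k + 1).toNat) M = some 0 := by
          rw [hw, hMeq]; exact PySem.List.index?_cons_self x t
        rw [aLoop_cons_zero _ _ _ _ _ _ hst, if_neg (by omega)]
        rw [bLoop_step out (x :: rest) k ⟨hk, hlen⟩ M 0 hb hidxw]
        have ihh := ih rest.length (by omega) rest rfl (out ++ [x]) k
        have e1 : (out ++ [x]) ++ rest = out ++ x :: rest := by simp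
        have e2 : (((out ++ [x]).length : Nat) : Int) = ↑out.length + 1 := by simp
        have e3 : (((out ++ [x]).length : Nat) : Int) + ↑rest.length
            = ↑out.length + ↑(x :: rest).length := by
          simp only [List.length_append, List.length_cons, List.length_nil]
          push_cast
          omega
        rw [e1, e3, e2] at ihh
        rw [hMeq]
        simp only [List.take_zero, List.drop_one, List.nil_append, Nat.cast_zero, sub_zero]
        exact ihh

-- ========== new B-side layer: the sorted candidate order selects the window max ==========

-- the lex key i ↦ (-arr[i], i) is what Source B sorts by
def lexKey (arr : List Int) (i : Int) : Int ×ₗ Int := toLex (-(PySem.List.pyGetD arr i 0), i)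

theorem sorted2_eq_sorted_lex (xs : List Int) (f : Int → Int) :
    PySem.List.sorted2 xs f (fun i => i) false
      = PySem.List.sorted xs (fun i => toLex (f i, i)) false := by
  rw [PySem.List.sorted_eq_foldl_insertBy]
  unfold PySem.List.sorted2
  simp only [if_neg (by decide : ¬ (false = true))]
  congr 1
  funext acc x
  congr 1
  funext a b
  by_cases h1 : f a < f b <;> by_cases h2 : f b < f a <;> by_cases h3 : a < b <;>
    simp [h1, h2, h3, Prod.Lex.toLex_lt_toLex] <;> omega

theorem find?_min {α κ : Type} [LinearOrder κ] (key : α → κ) (P : α → Bool) :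
    ∀ (l : List α) (g : α), l.Pairwise (fun a b => key a < key b) → g ∈ l → P g = true →
    (∀ y ∈ l, P y = true → key g ≤ key y) → l.find? P = some g := by
  intro l
  induction l with
  | nil => intro g _ hg; simp at hg
  | cons a t ih =>
    intro g hpair hg hPg hmin
    by_cases hag : a = g
    · subst hag
      simp [List.find?_cons, hPg]
    · have hgt : g ∈ t := by
        rcases List.mem_cons.mp hg with h | h
        · exact absurd h.symm hag
        · exact h
      have hPa : P a = false := by
        by_contra h
        have hPa' : P a = true := by
          cases hv : P a
          · exact absurd hv h
          · rfl
        have h1 := hmin a (List.mem_cons_self) hPa'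
        have h2 : key a < key g := (List.pairwise_cons.mp hpair).1 g hgt
        exact absurd (lt_of_le_of_lt h1 h2) (lt_irrefl _)
      rw [List.find?_cons, hPa]
      exact ih g (List.pairwise_cons.mp hpair).2 hgt hPg
        (fun y hy hP => hmin y (List.mem_cons_of_mem _ hy) hP)

theorem index?_self_of_pairwise_lt (l : List Int) (hl : l.Pairwise (· < ·)) (m : Nat)
    (hm : m < l.length) : PySem.List.index? l l[m] = some m := by
  rw [PySem.List.index?_eq_some_iff]
  refine ⟨l.take m, l.drop (m + 1), ?_, by simp [hm.le], ?_⟩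
  · conv_lhs => rw [← List.take_append_drop m l]
    rw [List.drop_eq_getElem_cons hm]
  · intro hmem
    obtain ⟨i, hlt, heq⟩ := List.mem_iff_getElem.mp hmem
    have hi : i < m := by
      have := hlt; simp at this; omega
    have : l[i]'(by omega) < l[m] := List.pairwise_iff_getElem.mp hl i m (by omega) hm hi
    rw [List.getElem_take] at heq
    omega

theorem bOrder_eq_sorted (arr : List Int) :
    bOrder arr = PySem.List.sorted (PySem.List.pyRange 0 (arr.length : Int) 1) (lexKey arr) false := by
  unfold bOrder lexKey
  exact sorted2_eq_sorted_lex _ _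

theorem nodup_pyRange_zero (n : Nat) : (PySem.List.pyRange 0 (n : Int) 1).Nodup := by
  rw [show ((1:Int)) = (1:Int) from rfl]
  rw [PySem.List.pyRange_zero_natCast n]
  exact (List.nodup_range).map Nat.cast_injective

theorem mem_bOrder (arr : List Int) (x : Int) :
    x ∈ bOrder arr ↔ 0 ≤ x ∧ x < (arr.length : Int) := by
  rw [bOrder_eq_sorted]
  rw [PySem.List.mem_sorted]
  exact PySem.List.mem_pyRange_one

theorem lexKey_inj (arr : List Int) {a b : Int} (h : lexKey arr a = lexKey arr b) : a = b := by
  unfold lexKey at h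
  have := toLex.injective h
  exact (Prod.ext_iff.mp this).2

theorem bOrder_pairwise (arr : List Int) :
    (bOrder arr).Pairwise (fun a b => lexKey arr a < lexKey arr b) := by
  rw [bOrder_eq_sorted]
  have hle := PySem.List.sorted_pairwise (PySem.List.pyRange 0 (arr.length : Int) 1) (lexKey arr)
  have hnd : (PySem.List.sorted (PySem.List.pyRange 0 (arr.length : Int) 1) (lexKey arr) false).Nodup :=
    ((PySem.List.sorted_perm _ _ _).symm).nodup (nodup_pyRange_zero arr.length)
  have := hle.and hnd
  exact this.imp (fun {a b} h => lt_of_le_of_ne h.1 (fun he => h.2 (lexKey_inj arr he)))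

theorem bw_step (arr : List Int) (rem : List (Int × Int)) (k : Int)
    (hsub : rem.Sublist (PySem.List.enumerate arr 0)) (hk : 0 < k) (hne : rem ≠ []) :
    ∃ (m : Nat) (hm : m < rem.length),
      (bOrder arr).find? (bPick (rem.map Prod.fst) k) = some ((rem.map Prod.fst)[m]'(by simpa using hm)) ∧
      PySem.List.index? (rem.map Prod.fst) ((rem.map Prod.fst)[m]'(by simpa using hm)) = some m ∧
      PySem.List.max? (((rem.map Prod.snd)).take (k + 1).toNat) (fun y => y) = some (rem[m].2) ∧
      PySem.List.index? (((rem.map Prod.snd)).take (k + 1).toNat) (rem[m].2) = some m := by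
  set keys := rem.map Prod.fst with hkeysdef
  set xs := rem.map Prod.snd with hxsdef
  set w := xs.take (k + 1).toNat with hwdef
  have hkl : keys.length = rem.length := by simp [hkeysdef]
  have hxl : xs.length = rem.length := by simp [hxsdef]
  -- each entry of rem is an (index, value) pair of arr
  have hentry : ∀ (p : Nat) (hp : p < rem.length), ∃ (jn : Nat) (hj : jn < arr.length),
      (rem[p]'hp) = ((jn : Int), arr[jn]'hj) := by
    intro p hp
    have hmem : rem[p]'hp ∈ PySem.List.enumerate arr 0 := hsub.mem (List.getElem_mem hp)
    obtain ⟨jn, hj, hpe⟩ := (PySem.List.mem_enumerate_iff arr 0 _).mp hmem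
    exact ⟨jn, hj, by rw [hpe]; simp⟩
  have hval : ∀ (p : Nat) (hp : p < rem.length),
      PySem.List.pyGetD arr ((rem[p]'hp).1) 0 = (rem[p]'hp).2 := by
    intro p hp
    obtain ⟨jn, hj, hpe⟩ := hentry p hp
    rw [hpe]
    simp only [PySem.List.pyGetD_natCast]
    exact List.getD_eq_getElem arr 0 hj
  have hkeyspair : keys.Pairwise (· < ·) := by
    rw [hkeysdef, List.pairwise_map]
    exact (PySem.List.pairwise_lt_enumerate arr 0).sublist hsub
  -- the window and its max
  have hxne : xs ≠ [] := by
    intro h; apply hne; rw [← List.map_eq_nil_iff (f := Prod.snd)]; exact h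
  have hwlen : w.length = min (k + 1).toNat xs.length := by simp [hwdef]
  have hwne : w ≠ [] := by
    have : 0 < w.length := by
      rw [hwlen]
      have : 0 < xs.length := List.length_pos_iff.mpr hxne
      omega
    exact List.ne_nil_of_length_pos this
  obtain ⟨c, wt, hcw⟩ := List.exists_cons_of_ne_nil hwne
  set best := wt.foldl max c with hbest
  have hb : PySem.List.max? w (fun y => y) = some best := by
    rw [hcw, PySem.List.max?_id_cons]
  have hbw : best ∈ w := by
    rw [hcw]
    rcases PySem.List.foldl_max_mem wt c with h | h
    · rw [hbest, h]; exact List.mem_cons_self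
    · exact List.mem_cons_of_mem _ (by rw [hbest]; exact h)
  obtain ⟨m, hm⟩ := Option.isSome_iff_exists.mp ((PySem.List.index?_isSome_iff w best).mpr hbw)
  obtain ⟨hmw, hwm, hfirst⟩ := PySem.List.getElem_of_index?_eq_some hm
  have hmr : m < rem.length := by rw [← hxl]; have := hwlen; omega
  have hwx : ∀ (p : Nat) (hp : p < w.length), w[p]'hp = (rem[p]'(by rw [← hxl]; omega)).2 := by
    intro p hp
    simp only [hwdef, hxsdef, List.getElem_take, List.getElem_map]
  have hrm2 : (rem[m]'hmr).2 = best := by rw [← hwm, hwx m hmw]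
  have hkm : ∀ (p : Nat) (hp : p < rem.length), keys[p]'(by omega) = (rem[p]'hp).1 := by
    intro p hp; simp only [hkeysdef, List.getElem_map]
  -- the candidate g and its properties
  have hmk : m < keys.length := by omega
  set g := keys[m]'hmk with hg
  have hPg : bPick keys k g = true := by
    unfold bPick
    rw [hg, index?_self_of_pairwise_lt keys hkeyspair m hmk]
    simp only []
    apply decide_eq_true
    have : m < (k + 1).toNat := by omega
    omega
  have hgval : PySem.List.pyGetD arr g 0 = best := by
    rw [hg, hkm m hmr, hval m hmr, hrm2]
  have hfind : (bOrder arr).find? (bPick keys k) = some g := by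
    apply find?_min (lexKey arr) (bPick keys k) (bOrder arr) g (bOrder_pairwise arr)
    · obtain ⟨jn, hj, hpe⟩ := hentry m hmr
      rw [mem_bOrder]
      rw [hg, hkm m hmr, hpe]
      refine ⟨by simp, by simpa using hj⟩
    · exact hPg
    · intro y hy hPy
      unfold bPick at hPy
      cases hidx : PySem.List.index? keys y with
      | none => rw [hidx] at hPy; simp at hPy
      | some p =>
        rw [hidx] at hPy
        have hpk : (p : Int) ≤ k := by simpa using hPy
        obtain ⟨hpl, hkp, -⟩ := PySem.List.getElem_of_index?_eq_some hidx
        have hpr : p < rem.length := by omega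
        have hpw : p < w.length := by
          have : p < (k + 1).toNat := by omega
          omega
        have hyval : PySem.List.pyGetD arr y 0 = (rem[p]'hpr).2 := by
          rw [← hkp, hkm p hpr, hval p hpr]
        have hple : (rem[p]'hpr).2 ≤ best := by
          rw [← hwx p hpw]
          exact PySem.List.max?_isMax hb _ (List.getElem_mem hpw)
        unfold lexKey
        rw [hgval, hyval]
        rcases lt_or_eq_of_le hple with hlt | heq
        · apply le_of_lt
          rw [Prod.Lex.toLex_lt_toLex]
          left; simp; omega
        · -- equal values: m is the first position of best, so m ≤ p and keys[m] ≤ keys[p]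
          have hmp : m ≤ p := by
            by_contra h
            exact hfirst p (by omega) (by rw [hwx p hpw, heq])
          rw [Prod.Lex.toLex_le_toLex]
          rcases Nat.eq_or_lt_of_le hmp with he | hl
          · subst he
            right
            constructor
            · simp [heq]
            · simp only []
              rw [hg, hkp]
          · right
            constructor
            · simp [heq]
            · simp only []
              rw [hg, ← hkp]
              exact le_of_lt (List.pairwise_iff_getElem.mp hkeyspair m p hmk hpl hl)
  refine ⟨m, hmr, ?_, ?_, ?_, ?_⟩
  · exact hfind
  · exact index?_self_of_pairwise_lt keys hkeyspair m hmk
  · rw [hrm2]; exact hb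
  · rw [hrm2]; exact hm

theorem bwLoop_stop (order : List Int) (out : List Int) (rem : List (Int × Int)) (k : Int)
    (hk : ¬ (0 < k ∧ 1 < rem.length)) :
    bwLoop order out rem k = out ++ rem.map Prod.snd := by
  rw [bwLoop, if_neg hk]

theorem bwLoop_step (order : List Int) (out : List Int) (rem : List (Int × Int)) (k : Int)
    (h : 0 < k ∧ 1 < rem.length) (idx : Int) (p : Nat)
    (hf : order.find? (bPick (rem.map Prod.fst) k) = some idx)
    (hp : PySem.List.index? (rem.map Prod.fst) idx = some p) :
    bwLoop order out rem k =
      bwLoop order (out ++ [(PySem.List.pyGetD rem (p : Int) (0, 0)).2])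
        (rem.take p ++ rem.drop (p + 1)) (k - (p : Int)) := by
  rw [bwLoop, if_pos h]
  simp only []
  split
  · rename_i h2; rw [hf] at h2; cases h2
  · rename_i idx' h2
    rw [hf] at h2
    cases h2
    split
    · rename_i h3; rw [hp] at h3; cases h3
    · rename_i p' h3
      rw [hp] at h3
      cases h3
      rfl

theorem bw_eq (arr : List Int) : ∀ (N : Nat) (rem : List (Int × Int)), rem.length = N →
    rem.Sublist (PySem.List.enumerate arr 0) → ∀ (out : List Int) (k : Int),
    bwLoop (bOrder arr) out rem k = bLoop out (rem.map Prod.snd) k := by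
  intro N
  induction N using Nat.strong_induction_on with
  | _ N ih =>
  intro rem hN hsub out k
  by_cases hg : 0 < k ∧ 1 < rem.length
  · obtain ⟨m, hmr, hfind, hidx, hmax, hidx2⟩ :=
      bw_step arr rem k hsub hg.1 (List.ne_nil_of_length_pos (by omega))
    rw [bwLoop_step (bOrder arr) out rem k hg _ m hfind hidx]
    rw [bLoop_step out (rem.map Prod.snd) k ⟨hg.1, by simpa using hg.2⟩ _ m hmax hidx2]
    have hval : (PySem.List.pyGetD rem (m : Int) (0, 0)).2 = rem[m].2 := by
      rw [PySem.List.pyGetD_natCast, List.getD_eq_getElem rem (0, 0) hmr]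
    rw [hval]
    have hmap : (rem.take m ++ rem.drop (m + 1)).map Prod.snd
        = (rem.map Prod.snd).take m ++ (rem.map Prod.snd).drop (m + 1) := by
      simp [List.map_take, List.map_drop]
    have hsub' : (rem.take m ++ rem.drop (m + 1)).Sublist (PySem.List.enumerate arr 0) := by
      refine List.Sublist.trans ?_ hsub
      have h1 : (rem.take m ++ rem.drop (m + 1)).Sublist (rem.take m ++ rem[m] :: rem.drop (m + 1)) :=
        List.Sublist.append_left (List.sublist_cons_self _ _) _
      have h2 : rem.take m ++ rem[m] :: rem.drop (m + 1) = rem := by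
        rw [← List.drop_eq_getElem_cons hmr, List.take_append_drop]
      rwa [h2] at h1
    have hlen' : (rem.take m ++ rem.drop (m + 1)).length = rem.length - 1 := by
      simp; omega
    rw [← hmap]
    exact ih (rem.length - 1) (by omega) _ hlen' hsub' _ _
  · rw [bwLoop_stop _ _ _ _ hg, bLoop_stop _ _ _ (by simpa using hg)]

-- ===== VERDICT (by name: the statement is the Claim_ definition above) =====
theorem smallestArr_spec : Claim_equal_smallestArr := by
  intro arr k _
  unfold Spec_smallestArr smallestArr smallestArr_alt
  have h1 := main_lemma arr.length arr rfl [] k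
  have h2 := bw_eq arr (PySem.List.enumerate arr 0).length (PySem.List.enumerate arr 0) rfl
    (List.Sublist.refl _) [] k
  rw [h2, PySem.List.map_snd_enumerate]
  simpa using h1
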